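-- pv_equiv track=rewrite | github.com/kana800/playground | 1-Beginner/text/vowels.py | vowels
-- ===== SOURCE A (Python) =====
-- def vowels(n):
--     v = ["a","e","i","o","u"]
--     summer = 0
--     store_letters = []
--     for i in n:
--         if i in v:
--             store_letters.append((i,n.count(i)))
--             summer += 1
--     return summer,sorted(list(set(store_letters)))
-- ===== SOURCE B (Python) =====
-- def vowels(n):
--     total = 0
--     res = []
--     for v in "aeiou":
--         c = n.count(v)
--         if c > 0:
--             res.append((v, c))
--             total += c
--     return total, res
-- ===== Notes on version B (the rewrite author's own statement) =====
-- stated objective: faster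
-- what changed: B iterates over the fixed five-vowel alphabet in alphabetical order, taking one n.count(v) per vowel and appending (v, c) when c > 0, instead of A's scan of every input character that appends a (vowel, count) pair per vowel occurrence (calling n.count each time) and then deduplicates with set() and sorts; the alphabetical vowel order makes B's list already sorted.
import Mathlib
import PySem

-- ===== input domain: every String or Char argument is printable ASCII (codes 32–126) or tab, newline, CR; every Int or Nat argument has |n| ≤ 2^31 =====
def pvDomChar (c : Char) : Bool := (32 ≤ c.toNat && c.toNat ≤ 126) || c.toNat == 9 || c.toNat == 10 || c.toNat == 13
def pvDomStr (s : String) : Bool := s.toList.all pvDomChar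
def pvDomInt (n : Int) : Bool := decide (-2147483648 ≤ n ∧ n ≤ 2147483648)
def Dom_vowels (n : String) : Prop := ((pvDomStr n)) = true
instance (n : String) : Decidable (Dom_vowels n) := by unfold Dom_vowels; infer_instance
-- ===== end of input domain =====

-- B iterates over the five-vowel alphabet with per-vowel counts instead of scanning the input and deduplicating via set(); simpler decomposition, same exact result.

-- ===== PORT A =====
def vowels (n : String) : Int × (List (String × Int)) :=
  let v : List String := ["a", "e", "i", "o", "u"]
  let st := n.toList.foldl
    (fun (acc : Int × List (String × Int)) i =>
      if v.contains (String.ofList [i]) then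
        (acc.1 + 1, acc.2 ++ [(String.ofList [i], (PySem.Str.count n (String.ofList [i]) : Int))])
      else acc)
    (0, [])
  (st.1, PySem.List.sorted2 (PySem.Set.ofList st.2) (fun p => p.1) (fun p => p.2))

-- ===== PORT B =====
def vowels_alt (n : String) : Int × (List (String × Int)) :=
  "aeiou".toList.foldl
    (fun (acc : Int × List (String × Int)) v =>
      let c : Int := (PySem.Str.count n (String.ofList [v]) : Int)
      if 0 < c then (acc.1 + c, acc.2 ++ [(String.ofList [v], c)]) else acc)
    (0, [])

-- ===== PRECONDITION & SPEC =====
def Spec_vowels (n : String) (out : Int × (List (String × Int))) : Prop := out = vowels_alt n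
instance (n : String) (out : Int × (List (String × Int))) : Decidable (Spec_vowels n out) := by unfold Spec_vowels; infer_instance

-- ===== CLAIM (what is proved, stated in full; the proofs are below) =====
def Claim_equal_vowels : Prop := ∀ (n : String), Dom_vowels n → Spec_vowels n (vowels n)

-- ===== LEMMAS AND PROOFS =====

-- n.count(c) for a one-character needle is the character count.
theorem pv_go_single (c : Char) : ∀ (t : List Char) (acc : Nat),
    PySem.Chars.count.go [c] t.length t acc = acc + t.count c := by
  intro t
  induction t with
  | nil => intro acc; simp only [List.length_nil]; rw [PySem.Chars.count.go]; simp
  | cons h t ih =>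
    intro acc
    rw [List.length_cons, PySem.Chars.count.go]
    have hpre : [c].isPrefixOf (h :: t) = (h == c) := by
      simp [List.isPrefixOf, BEq.comm]
    by_cases hc : h = c
    · subst hc
      simp only [hpre, BEq.rfl, if_true, List.length_singleton, List.drop_one, List.tail_cons, ih,
        List.count_cons, BEq.rfl]
      omega
    · have hb : (h == c) = false := by simp [hc]
      simp only [hpre, hb, Bool.false_eq_true, if_false, ih, List.count_cons]
      simp

theorem pv_count_single (n : String) (c : Char) :
    PySem.Str.count n (String.ofList [c]) = n.toList.count c := by
  simpa [PySem.Str.count, PySem.Chars.count] using pv_go_single c n.toList 0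

-- the vowel test of A, on characters
theorem pv_contains_iff (i : Char) :
    (["a", "e", "i", "o", "u"].contains (String.ofList [i]) = true) ↔
      i ∈ ['a', 'e', 'i', 'o', 'u'] := by
  have h1 : ∀ c : Char, String.ofList [i] = String.ofList [c] ↔ i = c := by
    intro c; rw [String.ofList_inj]; simp
  have e1 : ("a" : String) = String.ofList ['a'] := rfl
  have e2 : ("e" : String) = String.ofList ['e'] := rfl
  have e3 : ("i" : String) = String.ofList ['i'] := rfl
  have e4 : ("o" : String) = String.ofList ['o'] := rfl
  have e5 : ("u" : String) = String.ofList ['u'] := rfl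
  rw [List.contains_iff_mem]
  simp only [List.mem_cons, List.not_mem_nil, or_false, e1, e2, e3, e4, e5, h1]

theorem pv_contains_eq (i : Char) :
    (["a", "e", "i", "o", "u"].contains (String.ofList [i]))
      = decide (i ∈ ['a', 'e', 'i', 'o', 'u']) := by
  rcases Bool.eq_false_or_eq_true (["a", "e", "i", "o", "u"].contains (String.ofList [i])) with hX | hX
  · rw [hX]
    exact (decide_eq_true ((pv_contains_iff i).1 hX)).symm
  · rw [hX]
    symm
    rw [decide_eq_false_iff_not]
    intro hm
    rw [(pv_contains_iff i).2 hm] at hX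
    simp at hX

theorem pv_countP_eq (l : List Char) :
    l.countP (fun i => ["a", "e", "i", "o", "u"].contains (String.ofList [i]))
      = l.count 'a' + l.count 'e' + l.count 'i' + l.count 'o' + l.count 'u' := by
  simp only [pv_contains_eq]
  induction l with
  | nil => rfl
  | cons h t ih =>
    simp only [List.countP_cons, List.count_cons, ih]
    by_cases h1 : h = 'a'
    · subst h1; simp; omega
    · by_cases h2 : h = 'e'
      · subst h2; simp; omega
      · by_cases h3 : h = 'i'
        · subst h3; simp; omega
        · by_cases h4 : h = 'o'
          · subst h4; simp; omega
          · by_cases h5 : h = 'u'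
            · subst h5; simp; omega
            · simp [h1, h2, h3, h4, h5]

-- shape of A's loop
theorem pv_A_shape (n : String) :
    vowels n =
      (((n.toList.countP (fun i => ["a", "e", "i", "o", "u"].contains (String.ofList [i]))) : Int),
        PySem.List.sorted2
          (PySem.Set.ofList
            ((n.toList.filter (fun i => ["a", "e", "i", "o", "u"].contains (String.ofList [i]))).map
              (fun i => (String.ofList [i], (PySem.Str.count n (String.ofList [i]) : Int)))))
          (fun p => p.1) (fun p => p.2)) := by
  have hbody :
      (fun (acc : Int × List (String × Int)) i =>
          if ["a", "e", "i", "o", "u"].contains (String.ofList [i]) then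
            (acc.1 + 1, acc.2 ++ [(String.ofList [i], (PySem.Str.count n (String.ofList [i]) : Int))])
          else acc)
      = (fun (acc : Int × List (String × Int)) i =>
          (if ["a", "e", "i", "o", "u"].contains (String.ofList [i]) then acc.1 + 1 else acc.1,
           if ["a", "e", "i", "o", "u"].contains (String.ofList [i]) then
             acc.2 ++ [(String.ofList [i], (PySem.Str.count n (String.ofList [i]) : Int))]
           else acc.2)) := by
    funext acc i
    by_cases h : (["a", "e", "i", "o", "u"].contains (String.ofList [i]) = true)
    · rw [if_pos h, if_pos h, if_pos h]
    · rw [if_neg h, if_neg h, if_neg h]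
  show (_, _) = _
  rw [hbody,
    PySem.List.foldl_prod_mk
      (f := fun (s : Int) i => if ["a", "e", "i", "o", "u"].contains (String.ofList [i]) then s + 1 else s)
      (g := fun (r : List (String × Int)) i =>
        if ["a", "e", "i", "o", "u"].contains (String.ofList [i]) then
          r ++ [(String.ofList [i], (PySem.Str.count n (String.ofList [i]) : Int))]
        else r),
    PySem.List.foldl_if_add_one, PySem.List.foldl_append_if]
  simp

-- shape of B's loop
theorem pv_B_shape (n : String) : ∀ (vs : List Char) (s : Int) (r : List (String × Int)),
    vs.foldl
      (fun (acc : Int × List (String × Int)) v =>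
        let c : Int := (PySem.Str.count n (String.ofList [v]) : Int)
        if 0 < c then (acc.1 + c, acc.2 ++ [(String.ofList [v], c)]) else acc)
      (s, r)
    = (s + ((vs.filter (fun v => decide (0 < (PySem.Str.count n (String.ofList [v]) : Int)))).map
          (fun v => (PySem.Str.count n (String.ofList [v]) : Int))).sum,
       r ++ (vs.filter (fun v => decide (0 < (PySem.Str.count n (String.ofList [v]) : Int)))).map
          (fun v => (String.ofList [v], (PySem.Str.count n (String.ofList [v]) : Int)))) := by
  intro vs
  induction vs with
  | nil => intro s r; simp
  | cons v t ih =>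
    intro s r
    by_cases h : 0 < (PySem.Str.count n (String.ofList [v]) : Int)
    · simp only [List.foldl_cons, if_pos h, ih, List.filter_cons, decide_eq_true h]
      simp [add_assoc]
    · simp only [List.foldl_cons, if_neg h, ih, List.filter_cons, decide_eq_false h]
      simp

-- insertBy only looks at `before` on the inserted element and list members
theorem pv_insertBy_congr {α : Type} (f g : α → α → Bool) (x : α) :
    ∀ (ys : List α), (∀ y ∈ ys, f x y = g x y) →
      PySem.List.insertBy f x ys = PySem.List.insertBy g x ys := by
  intro ys
  induction ys with
  | nil => intro _; rfl
  | cons y t ih =>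
    intro h
    rw [PySem.List.insertBy, PySem.List.insertBy]
    have hy : f x y = g x y := h y (by simp)
    rw [hy, ih (fun z hz => h z (by simp [hz]))]

-- a sort driven by `before` agrees for two comparators equal on the sorted list's elements
theorem pv_foldl_insertBy_congr {α : Type} (f g : α → α → Bool) (S : List α)
    (hfg : ∀ a ∈ S, ∀ b ∈ S, f a b = g a b) :
    ∀ (xs : List α) (acc : List α), (∀ x ∈ xs, x ∈ S) → (∀ x ∈ acc, x ∈ S) →
      xs.foldl (fun acc x => PySem.List.insertBy f x acc) acc
        = xs.foldl (fun acc x => PySem.List.insertBy g x acc) acc := by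
  intro xs
  induction xs with
  | nil => intro acc _ _; rfl
  | cons x t ih =>
    intro acc hxs hacc
    have hx : x ∈ S := hxs x (by simp)
    simp only [List.foldl_cons]
    rw [pv_insertBy_congr f g x acc (fun y hy => hfg x hx y (hacc y hy))]
    exact ih _ (fun z hz => hxs z (by simp [hz]))
      (fun z hz => by
        rcases (PySem.List.mem_insertBy g x z acc).1 hz with h | h
        · exact h ▸ hx
        · exact hacc z h)

-- Python's tuple sort equals sorting by the first component when firsts determine the pair
theorem pv_sorted2_eq_sorted (xs : List (String × Int))
    (hdet : ∀ a ∈ xs, ∀ b ∈ xs, a.1 = b.1 → a = b) :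
    PySem.List.sorted2 xs (fun p => p.1) (fun p => p.2)
      = PySem.List.sorted xs (fun p => p.1) := by
  rw [PySem.List.sorted2, PySem.List.sorted]
  apply pv_foldl_insertBy_congr _ _ xs _ xs [] (fun x hx => hx) (by simp)
  intro a ha b hb
  rcases lt_trichotomy a.1 b.1 with h | h | h
  · simp [h]
  · have : a = b := hdet a ha b hb h
    subst this
    simp
  · simp [h, not_lt.mpr (le_of_lt h)]

theorem pv_vowelstr_pairwise :
    List.Pairwise (fun a b : Char => String.ofList [a] < String.ofList [b])
      ['a', 'e', 'i', 'o', 'u'] := by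
  simp only [String.lt_iff_toList_lt]
  decide

-- dropping the zero-count vowels does not change the sum of counts
theorem pv_sum_filter (l : List Char) : ∀ vs : List Char,
    ((vs.filter (fun v => decide (0 < ((l.count v : Nat) : Int)))).map
        (fun v => ((l.count v : Nat) : Int))).sum
      = ((vs.map (fun v => l.count v)).sum : Int) := by
  intro vs
  induction vs with
  | nil => simp
  | cons v t ih =>
    rcases Nat.eq_zero_or_pos (l.count v) with h | h
    · have hz : decide (0 < ((l.count v : Nat) : Int)) = false := by
        rw [decide_eq_false_iff_not]
        omega
      simp only [List.filter_cons, hz, Bool.false_eq_true, if_false, ih, List.map_cons,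
        List.sum_cons]
      omega
    · have hpos : decide (0 < ((l.count v : Nat) : Int)) = true := by
        rw [decide_eq_true_eq]
        omega
      simp only [List.filter_cons, hpos, if_true, List.map_cons, List.sum_cons, ih]
      push_cast
      ring

-- ===== VERDICT (by name: the statement is the Claim_ definition above) =====
theorem vowels_spec : Claim_equal_vowels := by
  intro n _
  unfold Spec_vowels
  rw [pv_A_shape]
  unfold vowels_alt
  rw [pv_B_shape]
  set V : List Char := ['a', 'e', 'i', 'o', 'u'] with hV
  have hVlist : "aeiou".toList = V := rfl
  rw [hVlist]
  set l := n.toList with hl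
  have hpv : ∀ i : Char,
      (["a", "e", "i", "o", "u"].contains (String.ofList [i]) = true) ↔ i ∈ V := fun i =>
    pv_contains_iff i
  have hq : ∀ v : Char,
      (decide (0 < (PySem.Str.count n (String.ofList [v]) : Int)) = true) ↔ v ∈ l := by
    intro v
    rw [pv_count_single]
    simp only [decide_eq_true_eq]
    constructor
    · intro h
      exact List.count_pos_iff.1 (by exact_mod_cast h)
    · intro h
      exact_mod_cast List.count_pos_iff.2 h
  -- the two result lists are the same list
  have hlist :
      PySem.List.sorted2
        (PySem.Set.ofList
          ((l.filter (fun i => ["a", "e", "i", "o", "u"].contains (String.ofList [i]))).map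
            (fun i => (String.ofList [i], (PySem.Str.count n (String.ofList [i]) : Int)))))
        (fun p => p.1) (fun p => p.2)
      = (V.filter (fun v => decide (0 < (PySem.Str.count n (String.ofList [v]) : Int)))).map
          (fun v => (String.ofList [v], (PySem.Str.count n (String.ofList [v]) : Int))) := by
    set store := (l.filter (fun i => ["a", "e", "i", "o", "u"].contains (String.ofList [i]))).map
        (fun i => (String.ofList [i], (PySem.Str.count n (String.ofList [i]) : Int))) with hstore
    set T := (V.filter (fun v => decide (0 < (PySem.Str.count n (String.ofList [v]) : Int)))).map
        (fun v => (String.ofList [v], (PySem.Str.count n (String.ofList [v]) : Int))) with hT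
    have hmem_store : ∀ x, x ∈ store ↔ ∃ i, i ∈ l ∧ i ∈ V ∧
        x = (String.ofList [i], (PySem.Str.count n (String.ofList [i]) : Int)) := by
      intro x
      simp only [hstore, List.mem_map, List.mem_filter]
      constructor
      · rintro ⟨i, ⟨hi, hc⟩, rfl⟩
        exact ⟨i, hi, (hpv i).1 hc, rfl⟩
      · rintro ⟨i, hi, hiv, rfl⟩
        exact ⟨i, ⟨hi, (hpv i).2 hiv⟩, rfl⟩
    have hmem_T : ∀ x, x ∈ T ↔ ∃ i, i ∈ l ∧ i ∈ V ∧
        x = (String.ofList [i], (PySem.Str.count n (String.ofList [i]) : Int)) := by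
      intro x
      simp only [hT, List.mem_map, List.mem_filter]
      constructor
      · rintro ⟨v, ⟨hv, hc⟩, rfl⟩
        exact ⟨v, (hq v).1 hc, hv, rfl⟩
      · rintro ⟨i, hi, hiv, rfl⟩
        exact ⟨i, ⟨hiv, (hq i).2 hi⟩, rfl⟩
    have hTfst : List.Pairwise (fun a b : String × Int => a.1 < b.1) T := by
      apply List.Pairwise.map
      · intro a b h
        exact h
      · exact List.Pairwise.sublist List.filter_sublist pv_vowelstr_pairwise
    have hdet : ∀ a ∈ PySem.Set.ofList store, ∀ b ∈ PySem.Set.ofList store, a.1 = b.1 → a = b := by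
      intro a ha b hb hfst
      rw [PySem.Set.mem_ofList] at ha hb
      rcases (hmem_store a).1 ha with ⟨i, _, _, rfl⟩
      rcases (hmem_store b).1 hb with ⟨j, _, _, rfl⟩
      have hfst' : String.ofList [i] = String.ofList [j] := hfst
      have : i = j := by simpa using String.ofList_inj.1 hfst'
      subst this
      rfl
    rw [pv_sorted2_eq_sorted _ hdet]
    have hTnodup : T.Nodup := by
      exact List.Nodup.map (fun a b h => by
        have h1 : String.ofList [a] = String.ofList [b] := congrArg Prod.fst h
        have : ([a] : List Char) = [b] := String.ofList_inj.1 h1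
        simpa using this) (List.Nodup.filter _ (by decide))
    have hperm : T.Perm (PySem.Set.ofList store) := by
      apply (List.perm_ext_iff_of_nodup hTnodup (PySem.Set.nodup_ofList store)).2
      intro x
      rw [hmem_T, PySem.Set.mem_ofList, hmem_store]
    exact PySem.List.sorted_eq_of_perm_of_pairwise_lt (PySem.Set.ofList store) T
      (fun p => p.1) hperm hTfst
  rw [hlist]
  -- the two sums agree
  congr 1
  rw [pv_countP_eq]
  simp only [pv_count_single]
  rw [pv_sum_filter l V]
  simp only [hV, List.map_cons, List.map_nil, List.sum_cons, List.sum_nil]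
  push_cast
  ring
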